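-- pv_equiv track=rewrite | github.com/RinaBoni/theory-of-programming-languages-7 | lab2/lab2.py | analizator21
-- ===== SOURCE A (Python) =====
-- class State:
--     H, C, D, S, N, P, B, A, ERROR = range(9)
--
-- def state_to_string(current_state):
--     states = ["H", "C", "D", "S", "N", "P", "B", "A", "ERROR"]
--     return states[current_state]
--
-- def analizator21(text):
--     current_state = State.H
--     # current_state = State.N
--     count = 0
--     txtsize = len(text)
--     res = ""
--
--     while current_state != State.ERROR and current_state != State.S and count < txtsize:
--         if current_state == State.H:
--             if text[count] in ('1', '0'):
--                 current_state = State.N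
--             else:
--                 current_state = State.ERROR
--         elif current_state == State.N:
--             if text[count] in ('1', '0'):
--                 current_state = State.N
--             elif text[count] == '.':
--                 current_state = State.P
--             else:
--                 current_state = State.ERROR
--         elif current_state == State.P:
--             if text[count] in ('1', '0'):
--                 current_state = State.S
--             else:
--                 current_state = State.ERROR
--         elif current_state == State.S:
--             if text[count] in ('1', '0'):
--                 current_state = State.S
--             else:
--                 current_state = State.ERROR
--
--         res += state_to_string(current_state) + " "
--         count += 1
--
--
--
--     if contains_S(res):
--         return "Цепочка принадлежит грамматике"
--     else:
--         return "Цепочка не принадлежит грамматике"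
--
-- def contains_S(input_string):
--     return 'S' in input_string
-- ===== SOURCE B (Python) =====
-- def analizator21(text):
--     i = 0
--     n = len(text)
--     while i < n and text[i] in '01':
--         i += 1
--     if i >= 1 and i + 1 < n and text[i] == '.' and text[i + 1] in '01':
--         return "Цепочка принадлежит грамматике"
--     return "Цепочка не принадлежит грамматике"
-- ===== Notes on version B (the rewrite author's own statement) =====
-- stated objective: simpler
-- what changed: Replaces the labelled FSM that accumulates a state-trace string and then searches it for 'S' by a direct scan: count the leading run of '0'/'1' characters, then accept iff that run is nonempty and is followed by '.' and one more binary digit.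
import Mathlib
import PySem

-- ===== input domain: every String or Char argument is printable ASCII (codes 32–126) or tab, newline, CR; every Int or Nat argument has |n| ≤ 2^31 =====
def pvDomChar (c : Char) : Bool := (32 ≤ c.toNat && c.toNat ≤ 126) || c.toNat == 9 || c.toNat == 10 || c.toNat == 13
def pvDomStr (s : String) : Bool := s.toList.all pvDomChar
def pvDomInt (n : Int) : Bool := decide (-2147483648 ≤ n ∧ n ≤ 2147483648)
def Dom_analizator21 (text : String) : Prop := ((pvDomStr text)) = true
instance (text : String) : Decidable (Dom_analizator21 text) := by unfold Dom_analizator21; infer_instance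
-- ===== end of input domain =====

-- B replaces A's labelled-state machine (with its state-trace string and 'S'-substring test)
-- by a direct scan of the leading binary-digit run followed by a check of the two next
-- characters; objective: simpler (same O(n) cost).

-- ===== PORT A =====
-- states: H=0, C=1, D=2, S=3, N=4, P=5, B=6, A=7, ERROR=8  (as in class State)
def stateToString (st : Nat) : String :=
  (["H", "C", "D", "S", "N", "P", "B", "A", "ERROR"]).getD st ""

def containsS (s : String) : Bool := s.toList.contains 'S'

-- the while loop: remaining characters, current state, accumulated res
def loopA : List Char → Nat → String → String
  | [], _, res => res
  | c :: rest, st, res =>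
    if st = 8 ∨ st = 3 then res
    else
      let st' :=
        if st = 0 then (if c = '1' ∨ c = '0' then 4 else 8)
        else if st = 4 then (if c = '1' ∨ c = '0' then 4 else if c = '.' then 5 else 8)
        else if st = 5 then (if c = '1' ∨ c = '0' then 3 else 8)
        else if st = 3 then (if c = '1' ∨ c = '0' then 3 else 8)
        else st
      loopA rest st' (res ++ stateToString st' ++ " ")

def analizator21 (text : String) : String :=
  let res := loopA text.toList 0 ""
  if containsS res then "Цепочка принадлежит грамматике"
  else "Цепочка не принадлежит грамматике"

-- ===== PORT B =====
-- length of the leading run of '0'/'1' characters (B's while loop)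
def leadBin : List Char → Nat
  | [] => 0
  | c :: rest => if c = '0' ∨ c = '1' then leadBin rest + 1 else 0

def analizator21_alt (text : String) : String :=
  let cs := text.toList
  let i := leadBin cs
  if 1 ≤ i ∧ i + 1 < cs.length ∧ cs.getD i ' ' = '.' ∧
      (cs.getD (i + 1) ' ' = '0' ∨ cs.getD (i + 1) ' ' = '1') then
    "Цепочка принадлежит грамматике"
  else "Цепочка не принадлежит грамматике"

-- ===== PRECONDITION & SPEC =====
def Spec_analizator21 (text : String) (out : String) : Prop := out = analizator21_alt text
instance (text : String) (out : String) : Decidable (Spec_analizator21 text out) := by unfold Spec_analizator21; infer_instance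

-- ===== CLAIM (what is proved, stated in full; the proofs are below) =====
def Claim_equal_analizator21 : Prop := ∀ (text : String), Dom_analizator21 text → Spec_analizator21 text (analizator21 text)

-- ===== LEMMAS AND PROOFS =====

-- Bool recursion mirroring the loop: does the run from state st on cs ever enter state S?
def reachS : List Char → Nat → Bool
  | [], _ => false
  | c :: rest, st =>
    if st = 8 ∨ st = 3 then false
    else
      let st' :=
        if st = 0 then (if c = '1' ∨ c = '0' then 4 else 8)
        else if st = 4 then (if c = '1' ∨ c = '0' then 4 else if c = '.' then 5 else 8)
        else if st = 5 then (if c = '1' ∨ c = '0' then 3 else 8)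
        else if st = 3 then (if c = '1' ∨ c = '0' then 3 else 8)
        else st
      (st' == 3) || reachS rest st'

lemma containsS_stateToString (st : Nat) : containsS (stateToString st) = (st == 3) := by
  unfold stateToString
  match st with
  | 0 | 1 | 2 | 3 | 4 | 5 | 6 | 7 | 8 => decide
  | n + 9 => simp [containsS, List.getD]

lemma containsS_append (a b : String) : containsS (a ++ b) = (containsS a || containsS b) := by
  simp [containsS, String.toList_append]

lemma containsS_loopA (cs : List Char) (st : Nat) (res : String) :
    containsS (loopA cs st res) = (containsS res || reachS cs st) := by
  induction cs generalizing st res with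
  | nil => simp [loopA, reachS]
  | cons c rest ih =>
    simp only [loopA, reachS]
    split
    · simp
    · rw [ih]
      rw [containsS_append, containsS_append, containsS_stateToString]
      have : containsS " " = false := by decide
      rw [this]
      simp [Bool.or_assoc]

-- from state ERROR the loop never reaches S
lemma reachS_err (cs : List Char) : reachS cs 8 = false := by
  cases cs <;> simp [reachS]

-- acceptance from state N, characterised by the leading binary run
lemma reachS_N (cs : List Char) :
    reachS cs 4 =
      decide (leadBin cs + 1 < cs.length ∧ cs.getD (leadBin cs) ' ' = '.' ∧
        (cs.getD (leadBin cs + 1) ' ' = '0' ∨ cs.getD (leadBin cs + 1) ' ' = '1')) := by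
  induction cs with
  | nil => simp [reachS, leadBin]
  | cons c rest ih =>
    by_cases hb : c = '1' ∨ c = '0'
    · have hb' : c = '0' ∨ c = '1' := hb.symm
      simp only [reachS, leadBin, if_pos hb, if_pos hb']
      norm_num
      rw [ih]
      simp [List.getD]
    · have hb' : ¬ (c = '0' ∨ c = '1') := fun h => hb h.symm
      by_cases hd : c = '.'
      · subst hd
        simp only [reachS, leadBin]
        norm_num
        cases rest with
        | nil => simp [reachS]
        | cons d r2 =>
          by_cases hdb : d = '1' ∨ d = '0'
          · simp [reachS, hdb, hdb.symm]
          · have hdb' : ¬ (d = '0' ∨ d = '1') := fun h => hdb h.symm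
            push Not at hdb
            simp [reachS, hdb.1, hdb.2, reachS_err]
      · simp only [reachS, leadBin, if_neg hb, if_neg hb', if_neg hd]
        norm_num [reachS_err]
        simp [hd]

-- ===== VERDICT (by name: the statement is the Claim_ definition above) =====
theorem analizator21_spec : Claim_equal_analizator21 := by
  intro text _
  unfold Spec_analizator21 analizator21 analizator21_alt
  dsimp only
  rw [containsS_loopA]
  have hres : containsS "" = false := by decide
  rw [hres, Bool.false_or]
  cases hcs : text.toList with
  | nil => simp [reachS, leadBin]
  | cons c rest =>
    by_cases hb : c = '1' ∨ c = '0'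
    · have hb' : c = '0' ∨ c = '1' := hb.symm
      simp only [reachS, leadBin, if_pos hb, if_pos hb']
      norm_num
      rw [reachS_N]
      simp [List.getD]
    · have hb' : ¬ (c = '0' ∨ c = '1') := fun h => hb h.symm
      simp only [reachS, leadBin, if_neg hb, if_neg hb']
      norm_num [reachS_err]
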